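-- pv_equiv track=rewrite | github.com/Anku-Kashyap/DSA | equalno_zero_and_one.py | check
-- ===== SOURCE A (Python) =====
-- def check(s,n):
--     one,zero,count =0,0,0
--     for i in range(n):
--         if s[i]=='1':
--             one+=1
--         else:
--             zero+=1
--
--         if one==zero:
--             count+=1
--     return count
-- ===== SOURCE B (Python) =====
-- def check(s, n):
--     # Index-based algorithm: collect the positions of the '1's among the first
--     # n characters (indexing s[i], so n > len(s) raises IndexError as in A).
--     # The prefix of length 2*j has equal 0s and 1s iff it contains exactly j
--     # ones, i.e. iff the j-th one sits before position 2*j and the (j+1)-th one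
--     # (if any) sits at or after it; odd-length prefixes can never be balanced.
--     p = [i for i in range(n) if s[i] == '1']
--     res = 0
--     for j in range(1, n // 2 + 1):
--         if j <= len(p) and p[j - 1] < 2 * j and (j == len(p) or p[j] >= 2 * j):
--             res += 1
--     return res
-- ===== Notes on version B (the rewrite author's own statement) =====
-- stated objective: alternative
-- what changed: Replaces A's single pass with two running counters by an index-based algorithm: B collects the positions of the '1's once and then decides each candidate half-length j by two comparisons against the j-th and (j+1)-th one-position, with no counter or balance carried across prefix lengths.
import Mathlib
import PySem

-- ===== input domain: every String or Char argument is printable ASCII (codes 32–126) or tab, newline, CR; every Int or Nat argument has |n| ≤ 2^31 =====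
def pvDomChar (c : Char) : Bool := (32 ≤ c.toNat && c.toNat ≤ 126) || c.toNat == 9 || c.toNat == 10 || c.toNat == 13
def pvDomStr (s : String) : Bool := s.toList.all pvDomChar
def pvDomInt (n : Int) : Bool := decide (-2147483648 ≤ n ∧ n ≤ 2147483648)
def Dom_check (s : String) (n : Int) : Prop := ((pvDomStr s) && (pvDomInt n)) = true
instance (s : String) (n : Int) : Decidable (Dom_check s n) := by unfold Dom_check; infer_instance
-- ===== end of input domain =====

-- B replaces A's single pass with two running counters by an index-based algorithm over the
-- positions of the '1's, deciding each candidate half-length by two index comparisons (objective: alternative).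

-- ===== PORT A =====
-- for i in range(n): read s[i] (Pre_ keeps every i in range), bump one/zero, bump count when equal
def check (s : String) (n : Int) : Int :=
  let st := (PySem.List.pyRange 0 n 1).foldl
    (fun (st : Int × Int × Int) i =>
      let c := PySem.List.pyGetD s.toList i ' '
      let one := if c = '1' then st.1 + 1 else st.1
      let zero := if c = '1' then st.2.1 else st.2.1 + 1
      let count := if one = zero then st.2.2 + 1 else st.2.2
      (one, zero, count)) (0, 0, 0)
  st.2.2

-- ===== PORT B =====
-- p = [i for i in range(n) if s[i] == '1']; for j in range(1, n//2 + 1): test p[j-1] and p[j]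
-- (Python's short-circuit `and`/`or` keeps p[j-1]/p[j] in range; the truth-functional ∧/∨ with a
--  pyGetD default agree with it, the default being irrelevant whenever the guard's value matters)
def check_alt (s : String) (n : Int) : Int :=
  let p := (PySem.List.pyRange 0 n 1).filter
    (fun i => PySem.List.pyGetD s.toList i ' ' == '1')
  (PySem.List.pyRange 1 (PySem.Int.floordiv n 2 + 1) 1).foldl
    (fun (acc : Int) j =>
      if j ≤ (p.length : Int) ∧ PySem.List.pyGetD p (j - 1) 0 < 2 * j ∧
          (j = (p.length : Int) ∨ 2 * j ≤ PySem.List.pyGetD p j 0)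
      then acc + 1 else acc) 0

-- ===== PRECONDITION & SPEC =====
-- A indexes s[i] for i in range(n), so it raises IndexError when n exceeds len(s); Pre_ excludes exactly those inputs (B raises there too).
def Pre_check (s : String) (n : Int) : Prop := n ≤ (s.toList.length : Int)
instance (s : String) (n : Int) : Decidable (Pre_check s n) := by unfold Pre_check; infer_instance
def pvWitness_check : String × Int := ("0101", 4)

def Spec_check (s : String) (n : Int) (out : Int) : Prop := out = check_alt s n
instance (s : String) (n : Int) (out : Int) : Decidable (Spec_check s n out) := by unfold Spec_check; infer_instance

-- ===== CLAIM (what is proved, stated in full; the proofs are below) =====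
def Claim_equal_check : Prop := ∀ (s : String) (n : Int), Dom_check s n → Pre_check s n → Spec_check s n (check s n)

-- ===== LEMMAS AND PROOFS =====

-- running-balance sequence of a char list, starting from balance b (characterises A's loop)
def scanBal (b : Int) : List Char → List Int
  | [] => []
  | c :: cs => (b + (if c = '1' then 1 else -1)) :: scanBal (b + (if c = '1' then 1 else -1)) cs

-- A's loop body as a named function
def stepA (st : Int × Int × Int) (c : Char) : Int × Int × Int :=
  let one := if c = '1' then st.1 + 1 else st.1
  let zero := if c = '1' then st.2.1 else st.2.1 + 1
  let count := if one = zero then st.2.2 + 1 else st.2.2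
  (one, zero, count)

-- indices (below m) of the '1' characters of l
def onesIdx (l : List Char) (m : Nat) : List Nat :=
  (List.range m).filter (fun k => l.getD k ' ' == '1')

theorem foldA_count (cs : List Char) : ∀ (o z cnt : Int),
    (cs.foldl stepA (o, z, cnt)).2.2 = cnt + ((scanBal (o - z) cs).count 0 : Int) := by
  induction cs with
  | nil => intro o z cnt; simp [scanBal]
  | cons c cs ih =>
    intro o z cnt
    by_cases hc : c = '1'
    · rw [List.foldl_cons,
        show stepA (o, z, cnt) c = (o + 1, z, if o + 1 = z then cnt + 1 else cnt) from by
          simp [stepA, hc],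
        ih, show scanBal (o - z) (c :: cs) = (o - z + 1) :: scanBal (o - z + 1) cs from by
          simp [scanBal, hc],
        show o + 1 - z = o - z + 1 from by ring, List.count_cons]
      simp only [beq_iff_eq]
      split_ifs <;> push_cast <;> omega
    · rw [List.foldl_cons,
        show stepA (o, z, cnt) c = (o, z + 1, if o = z + 1 then cnt + 1 else cnt) from by
          simp [stepA, hc],
        ih, show scanBal (o - z) (c :: cs) = (o - z + -1) :: scanBal (o - z + -1) cs from by
          simp [scanBal, hc],
        show o - (z + 1) = o - z + -1 from by ring, List.count_cons]
      simp only [beq_iff_eq]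
      split_ifs <;> push_cast <;> omega

-- A's fold over range(n) with s[i] is the fold over the length-n prefix, for n ≤ len
theorem fold_range_getD {σ : Type} (l : List Char) (f : σ → Char → σ) (init : σ) :
    ∀ (m : Nat), m ≤ l.length →
    (PySem.List.pyRange 0 (m : Int) 1).foldl (fun st i => f st (PySem.List.pyGetD l i ' ')) init
      = (l.take m).foldl f init := by
  intro m
  induction m generalizing init with
  | zero => intro _; simp [PySem.List.pyRange_one_eq_nil]
  | succ k ih =>
    intro h
    rw [show ((k + 1 : Nat) : Int) = (k : Int) + 1 by push_cast; ring,
        PySem.List.pyRange_one_succ_right (by positivity), List.foldl_append]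
    rw [ih init (by omega)]
    have : l.take (k + 1) = l.take k ++ [l[k]'(by omega)] := by
      rw [List.take_add_one]; simp [List.getElem?_eq_getElem (by omega : k < l.length)]
    rw [this, List.foldl_append]
    simp [PySem.List.pyGetD_natCast, List.getD_eq_getElem?_getD,
      List.getElem?_eq_getElem (by omega : k < l.length)]

-- the balance after j+1 characters is twice the ones count minus the length
theorem scanBal_eq_map (cs : List Char) : ∀ (b : Int),
    scanBal b cs = (List.range cs.length).map
      (fun j => b + 2 * ((cs.take (j + 1)).count '1' : Int) - (j + 1)) := by
  induction cs with
  | nil => intro b; simp [scanBal]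
  | cons c cs ih =>
    intro b
    rw [show scanBal b (c :: cs)
          = (b + (if c = '1' then 1 else -1)) :: scanBal (b + (if c = '1' then 1 else -1)) cs
        from rfl, ih]
    rw [List.length_cons, List.range_succ_eq_map, List.map_cons, List.map_map]
    congr 1
    · by_cases hc : c = '1' <;> simp [hc] <;> ring
    · apply List.map_congr_left
      intro j _
      by_cases hc : c = '1' <;> simp [List.take_succ_cons, hc] <;> ring

theorem check_eq_scan (s : String) (n : Int) (h : Pre_check s n) :
    check s n = ((scanBal 0 (s.toList.take n.toNat)).count 0 : Int) := by
  unfold check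
  by_cases hn : 0 < n
  · have hm : n.toNat ≤ s.toList.length := by
      unfold Pre_check at h; omega
    have hcast : ((n.toNat : Nat) : Int) = n := by omega
    rw [show (fun (st : Int × Int × Int) i =>
          let c := PySem.List.pyGetD s.toList i ' '
          let one := if c = '1' then st.1 + 1 else st.1
          let zero := if c = '1' then st.2.1 else st.2.1 + 1
          let count := if one = zero then st.2.2 + 1 else st.2.2
          (one, zero, count))
        = (fun st i => stepA st (PySem.List.pyGetD s.toList i ' ')) from rfl]
    rw [show PySem.List.pyRange 0 n 1 = PySem.List.pyRange 0 ((n.toNat : Nat) : Int) 1 from by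
          rw [hcast],
        fold_range_getD s.toList stepA (0, 0, 0) n.toNat hm]
    have := foldA_count (s.toList.take n.toNat) 0 0 0
    simpa using this
  · have : PySem.List.pyRange 0 n 1 = [] := PySem.List.pyRange_one_eq_nil (by omega)
    rw [this]
    have : n.toNat = 0 := by omega
    simp [this, scanBal]

-- the shared middle form: number of prefix lengths k ∈ [1..m] with 2·ones(k) = k
def balCnt (l : List Char) (m : Nat) : Nat :=
  (List.range m).countP (fun k => decide (2 * (l.take (k + 1)).count '1' = k + 1))

-- the even-length form B computes: half-lengths j ∈ [1..m/2] with 2·ones(2j) = 2j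
def balCnt2 (l : List Char) (m : Nat) : Nat :=
  (List.range (m / 2)).countP (fun j => decide (2 * (l.take (2 * (j + 1))).count '1' = 2 * (j + 1)))

-- odd prefix lengths are never balanced, so counting all lengths = counting even ones
theorem balCnt_eq_balCnt2 (l : List Char) : ∀ m : Nat, balCnt l m = balCnt2 l m := by
  intro m
  induction m with
  | zero => simp [balCnt, balCnt2]
  | succ m ih =>
    unfold balCnt balCnt2 at *
    rw [List.range_succ, List.countP_append]
    by_cases hp : (m + 1) % 2 = 0
    · have h2 : (m + 1) / 2 = m / 2 + 1 := by omega
      rw [h2, List.range_succ, List.countP_append, ih]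
      congr 1
      simp only [List.countP_cons, List.countP_nil]
      have : 2 * (m / 2 + 1) = m + 1 := by omega
      rw [this]
    · have h2 : (m + 1) / 2 = m / 2 := by omega
      rw [h2, ih]
      have : ¬ (2 * (l.take (m + 1)).count '1' = m + 1) := by omega
      simp [this]

theorem check_eq_balCnt (s : String) (n : Int) (h : Pre_check s n) :
    check s n = (balCnt s.toList n.toNat : Int) := by
  rw [check_eq_scan s n h, scanBal_eq_map]
  have hm : n.toNat ≤ s.toList.length := by unfold Pre_check at h; omega
  have hlen : (s.toList.take n.toNat).length = n.toNat := by
    rw [List.length_take]; omega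
  rw [hlen, List.count_eq_countP, List.countP_map]
  unfold balCnt
  congr 1
  apply List.countP_congr
  intro j hj
  have hj' : j < n.toNat := List.mem_range.mp hj
  simp only [Function.comp_apply, beq_iff_eq, decide_eq_true_eq]
  rw [List.take_take, show min (j + 1) n.toNat = j + 1 from by omega]
  omega

-- the B comprehension equals the Nat-level ones-index list (cast to Int)
theorem filterB (l : List Char) : ∀ m : Nat,
    (PySem.List.pyRange 0 (m : Int) 1).filter (fun i => PySem.List.pyGetD l i ' ' == '1')
      = (onesIdx l m).map (Nat.cast) := by
  intro m
  induction m with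
  | zero => simp [PySem.List.pyRange_one_eq_nil, onesIdx]
  | succ k ih =>
    rw [show ((k + 1 : Nat) : Int) = (k : Int) + 1 by push_cast; ring,
        PySem.List.pyRange_one_succ_right (by positivity), List.filter_append, ih]
    simp only [onesIdx]
    rw [List.range_succ, List.filter_append, List.map_append]
    congr 1
    have hg : PySem.List.pyGetD l (k : Int) ' ' = l[k]?.getD ' ' := by
      rw [PySem.List.pyGetD_natCast]; simp [List.getD_eq_getElem?_getD]
    by_cases hc : l[k]?.getD ' ' = '1' <;> simp [hg, hc]

theorem onesIdx_sorted (l : List Char) (m : Nat) : (onesIdx l m).Pairwise (· < ·) :=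
  List.Pairwise.filter _ (List.pairwise_lt_range)

theorem onesIdx_length (l : List Char) : ∀ t : Nat,
    (onesIdx l t).length = (l.take t).count '1' := by
  intro t
  induction t with
  | zero => simp [onesIdx]
  | succ k ih =>
    rw [onesIdx, List.range_succ, List.filter_append, List.length_append, ← onesIdx, ih]
    by_cases hk : k < l.length
    · rw [show l.take (k + 1) = l.take k ++ [l[k]'hk] from by
          rw [List.take_add_one]; simp [List.getElem?_eq_getElem hk],
        List.count_append]
      by_cases hc : l[k] = '1' <;>
        simp [List.getD_eq_getElem?_getD, List.getElem?_eq_getElem hk, hc]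
    · have h1 : l.take (k + 1) = l.take k := by
        rw [List.take_of_length_le (by omega), List.take_of_length_le (by omega)]
      have h2 : l[k]? = none := List.getElem?_eq_none (by omega)
      simp [h1, List.getD_eq_getElem?_getD, h2]

theorem onesIdx_filter_lt (l : List Char) (t m : Nat) (h : t ≤ m) :
    (onesIdx l m).filter (fun x => x < t) = onesIdx l t := by
  unfold onesIdx
  rw [show m = t + (m - t) from by omega, List.range_add, List.filter_append,
      List.filter_append]
  have h1 : ((List.range t).filter (fun k => l.getD k ' ' == '1')).filter
      (fun x => decide (x < t)) = (List.range t).filter (fun k => l.getD k ' ' == '1') := by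
    apply List.filter_eq_self.mpr
    intro x hx
    have := List.mem_range.mp (List.mem_of_mem_filter hx)
    simpa using this
  have h2 : (((List.range (m - t)).map (t + ·)).filter (fun k => l.getD k ' ' == '1')).filter
      (fun x => decide (x < t)) = [] := by
    apply List.filter_eq_nil_iff.mpr
    intro x hx
    obtain ⟨b, _, hb⟩ := List.mem_map.mp (List.mem_of_mem_filter hx)
    simp only [decide_eq_true_eq]
    omega
  rw [h1, h2, List.append_nil]

-- on a strictly increasing list, the number of elements below t is j+1 iff the j-th element
-- is below t and the (j+1)-th (if any) is not
theorem sorted_count_lt (q : List Nat) (hs : q.Pairwise (· < ·)) (t : Nat) : ∀ j : Nat,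
    ((q.filter (fun x => x < t)).length = j + 1 ↔
      (j + 1 ≤ q.length ∧ q.getD j 0 < t ∧ (j + 1 = q.length ∨ t ≤ q.getD (j + 1) 0))) := by
  induction q with
  | nil => intro j; simp
  | cons a q ih =>
    intro j
    have ha : ∀ x ∈ q, a < x := (List.pairwise_cons.mp hs).1
    have hs' : q.Pairwise (· < ·) := (List.pairwise_cons.mp hs).2
    by_cases hat : a < t
    · rw [List.filter_cons_of_pos (by simpa using hat)]
      cases j with
      | zero =>
        simp only [List.length_cons, List.getD_cons_zero, List.getD_cons_succ]
        constructor
        · intro hlen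
          have hnil : q.filter (fun x => x < t) = [] := by
            apply List.eq_nil_of_length_eq_zero; omega
          refine ⟨by omega, hat, ?_⟩
          cases q with
          | nil => left; rfl
          | cons b q' =>
            right
            have : ¬ (b < t) := by
              intro hb
              have : b ∈ List.filter (fun x => decide (x < t)) (b :: q') :=
                List.mem_filter.mpr ⟨List.mem_cons_self, by simpa using hb⟩
              rw [hnil] at this; exact absurd this (List.not_mem_nil)
            simpa using by omega
        · rintro ⟨_, _, hor⟩
          have hnil : q.filter (fun x => x < t) = [] := by
            apply List.filter_eq_nil_iff.mpr
            intro x hx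
            cases q with
            | nil => exact absurd hx (List.not_mem_nil)
            | cons b q' =>
              rcases hor with h1 | h1
              · simp at h1
              · simp only [List.getD_cons_zero] at h1
                rcases List.mem_cons.mp hx with rfl | hx'
                · simp only [decide_eq_true_eq]; omega
                · have hbx : b < x := (List.pairwise_cons.mp hs').1 x hx'
                  simp only [decide_eq_true_eq]; omega
          rw [hnil]; rfl
      | succ j =>
        rw [List.length_cons, Nat.add_left_inj, ih hs' j]
        simp only [List.length_cons, List.getD_cons_succ]
        omega
    · rw [List.filter_cons_of_neg (by simpa using hat)]
      have hnil : q.filter (fun x => x < t) = [] := by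
        apply List.filter_eq_nil_iff.mpr
        intro x hx
        have := ha x hx
        simp only [decide_eq_true_eq]
        omega
      rw [hnil]
      simp only [List.length_nil]
      constructor
      · omega
      · rintro ⟨hle, hlt, _⟩
        exfalso
        cases j with
        | zero => simp at hlt; omega
        | succ j =>
          rw [List.getD_cons_succ] at hlt
          have hmem : q.getD j 0 ∈ q := by
            rw [List.getD_eq_getElem?_getD,
              List.getElem?_eq_getElem (by simp at hle; omega : j < q.length)]
            exact List.getElem_mem _
          have := ha _ hmem
          omega

-- getD through a Nat→Int cast map
theorem getD_map_cast (q : List Nat) : ∀ i : Nat, (q.map (Nat.cast)).getD i (0 : Int) = (q.getD i 0 : Int) := by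
  induction q with
  | nil => intro i; simp
  | cons a q ih =>
    intro i
    cases i with
    | zero => simp
    | succ i => simpa using ih i

theorem check_alt_eq_balCnt2 (s : String) (n : Int) (h : Pre_check s n) :
    check_alt s n = (balCnt2 s.toList n.toNat : Int) := by
  unfold check_alt
  have hm : n.toNat ≤ s.toList.length := by unfold Pre_check at h; omega
  by_cases hn : 0 < n
  · have hcast : ((n.toNat : Nat) : Int) = n := by omega
    have hfd : PySem.Int.floordiv n 2 = n / 2 := PySem.Int.floordiv_eq_ediv_of_pos (by omega)
    rw [show PySem.List.pyRange 0 n 1 = PySem.List.pyRange 0 ((n.toNat : Nat) : Int) 1 from by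
          rw [hcast],
        filterB s.toList n.toNat]
    set q := onesIdx s.toList n.toNat with hq
    rw [PySem.List.foldl_ite_add_one, PySem.List.pyRange_one 1 (PySem.Int.floordiv n 2 + 1),
        hfd, show ((n / 2 + 1 - 1).toNat) = n.toNat / 2 from by omega,
        List.countP_map, zero_add]
    unfold balCnt2
    congr 1
    apply List.countP_congr
    intro j hj
    have hj' : j < n.toNat / 2 := List.mem_range.mp hj
    simp only [Function.comp_apply, decide_eq_true_eq]
    have e1 : (1 : Int) + (j : Nat) - 1 = ((j : Nat) : Int) := by omega
    have e2 : (1 : Int) + (j : Nat) = (((j + 1 : Nat)) : Int) := by omega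
    rw [e1, e2, PySem.List.pyGetD_natCast, PySem.List.pyGetD_natCast,
        getD_map_cast, getD_map_cast, List.length_map]
    have hchar := sorted_count_lt q (onesIdx_sorted s.toList n.toNat) (2 * (j + 1)) j
    rw [onesIdx_filter_lt s.toList (2 * (j + 1)) n.toNat (by omega)] at hchar
    rw [onesIdx_length] at hchar
    constructor
    · intro ⟨h1, h2, h3⟩
      have h3' : j + 1 = q.length ∨ 2 * (j + 1) ≤ q.getD (j + 1) 0 := by
        rcases h3 with h | h
        · left; omega
        · right; omega
      have := hchar.mpr ⟨by omega, by omega, h3'⟩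
      omega
    · intro hcount
      obtain ⟨h1, h2, h3⟩ := hchar.mp (by omega)
      refine ⟨by omega, by omega, ?_⟩
      rcases h3 with h | h
      · left; omega
      · right; omega
  · have h1 : PySem.List.pyRange 0 n 1 = [] := PySem.List.pyRange_one_eq_nil (by omega)
    have hfd : PySem.Int.floordiv n 2 + 1 ≤ 1 := by
      rw [PySem.Int.floordiv_eq_ediv_of_pos (by omega)]; omega
    have h2 : PySem.List.pyRange 1 (PySem.Int.floordiv n 2 + 1) 1 = [] :=
      PySem.List.pyRange_one_eq_nil hfd
    have h3 : PySem.List.pyRange 1 (n / 2 + 1) 1 = [] := PySem.List.pyRange_one_eq_nil (by omega)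
    have h0 : n.toNat = 0 := by omega
    simp [h1, h3, balCnt2, h0]

-- ===== VERDICT (by name: the statement is the Claim_ definition above) =====
theorem check_spec : Claim_equal_check := by
  intro s n _ hpre
  unfold Spec_check
  rw [check_eq_balCnt s n hpre, check_alt_eq_balCnt2 s n hpre, balCnt_eq_balCnt2]
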